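-- pv_equiv track=rewrite | github.com/TheZXCVQ/Advent_of_code_2022 | main.py | puzzle_2022_5_1
-- ===== SOURCE A (Python) =====
-- from collections import deque
--
-- def puzzle_2022_5_1(input=None):
--     move_flag = False
--     nr_of_stacks = (len(input.split('\n')[0]) + 1) // 4
--     stacks = [deque() for _ in range(nr_of_stacks)]
--     ans = ""
--     for line in input.split('\n'):
--         if (not move_flag):
--             if (len(line) == 0):
--                 move_flag = True
--             else:
--                 for i in range(nr_of_stacks):
--                     if (line[1 + 4 * i] != ' '):
--                         stacks[i].appendleft(line[1 + 4 * i])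
--         else:
--             command = line.split(" ")
--             for i in range(int(command[1])):
--                 stacks[int(command[5]) - 1].append(stacks[int(command[3]) - 1].pop())
--     for st in stacks:
--         ans += st.pop()
--     return ans
-- ===== SOURCE B (Python) =====
-- def puzzle_2022_5_1(input=None):
--     lines = input.split('\n')
--     nr_of_stacks = (len(lines[0]) + 1) // 4
--     if '' in lines:
--         sep = lines.index('')
--         crate_lines, move_lines = lines[:sep], lines[sep + 1:]
--     else:
--         crate_lines, move_lines = lines, []
--     stacks = [[line[1 + 4 * i] for line in reversed(crate_lines) if line[1 + 4 * i] != ' ']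
--               for i in range(nr_of_stacks)]
--     for m in move_lines:
--         parts = m.split(" ")
--         cnt = int(parts[1])
--         if cnt > 0:
--             s, d = int(parts[3]) - 1, int(parts[5]) - 1
--             stacks[d].extend(reversed(stacks[s][-cnt:]))
--             del stacks[s][-cnt:]
--     return "".join(st[-1] for st in stacks)
-- ===== Notes on version B (the rewrite author's own statement) =====
-- stated objective: alternative
-- what changed: B replaces A's move_flag state machine and one-crate-at-a-time pop/append loop by two-phase parsing (split the input at the first blank line, build each stack directly from its column) and a single bulk slice transfer per move instruction.
-- outside the precondition, e.g. on puzzle_2022_5_1('[A]\n[B]\n 1 \n\nmove 4 from 1 to 1'): A returns 'A', B returns 'B'; on puzzle_2022_5_1('[B]\n 1 \n\nmove 3 from 1 to 1\nmove 3 from 1 to 1'): A returns 'B', B raises IndexError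
import Mathlib
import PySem

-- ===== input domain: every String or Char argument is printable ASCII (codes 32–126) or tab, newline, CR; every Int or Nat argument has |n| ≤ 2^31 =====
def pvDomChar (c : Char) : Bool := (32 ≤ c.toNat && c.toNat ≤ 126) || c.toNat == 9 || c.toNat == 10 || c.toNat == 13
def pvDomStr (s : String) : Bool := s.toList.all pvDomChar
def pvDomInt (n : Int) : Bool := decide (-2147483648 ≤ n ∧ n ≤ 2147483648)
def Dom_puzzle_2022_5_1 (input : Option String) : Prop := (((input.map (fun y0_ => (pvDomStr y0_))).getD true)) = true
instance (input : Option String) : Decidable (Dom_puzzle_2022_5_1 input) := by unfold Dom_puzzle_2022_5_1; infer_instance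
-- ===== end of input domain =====

-- B re-implements the crate simulation with two-phase parsing (split at the first blank line,
-- build each stack from its column) and one bulk slice transfer per move instead of A's
-- move_flag state machine with one-crate-at-a-time pops (objective: alternative decomposition).

-- ===== PORT A =====
-- one crate-drawing line: for i in range(nr_of_stacks): if line[1+4*i] != ' ': stacks[i].appendleft(...)
-- (deque is a List Char, bottom first / top last; appendleft is cons)
def pvA_crateLine (n : Nat) (st : List (List Char)) (line : List Char) : List (List Char) :=
  (PySem.List.pyRange 0 (n : Int)).foldl (fun st i =>
    if ((PySem.List.pyGet? line (1 + 4 * i)).getD ' ') ≠ ' ' then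
      PySem.List.pySetD st i (((PySem.List.pyGet? line (1 + 4 * i)).getD ' ') :: PySem.List.pyGetD st i [])
    else st) st

-- one move line: for i in range(int(command[1])): stacks[int(command[5])-1].append(stacks[int(command[3])-1].pop())
def pvA_moveLine (st : List (List Char)) (line : List Char) : List (List Char) :=
  let command := PySem.Chars.splitOn line [' ']
  (PySem.List.pyRange 0 ((PySem.Int.ofStr? (String.ofList (command.getD 1 []))).getD 0)).foldl
    (fun st _ =>
      let src := (PySem.Int.ofStr? (String.ofList (command.getD 3 []))).getD 0 - 1
      let dst := (PySem.Int.ofStr? (String.ofList (command.getD 5 []))).getD 0 - 1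
      let v := (PySem.List.pyGet? (PySem.List.pyGetD st src []) (-1)).getD ' '
      let st' := PySem.List.pySetD st src (PySem.List.pyGetD st src []).dropLast
      PySem.List.pySetD st' dst (PySem.List.pyGetD st' dst [] ++ [v])) st

-- the loop body over one line, with the move_flag state
def pvA_step (n : Nat) (acc : Bool × List (List Char)) (line : List Char) : Bool × List (List Char) :=
  if !acc.1 then
    if line.length = 0 then (true, acc.2)
    else (acc.1, pvA_crateLine n acc.2 line)
  else (acc.1, pvA_moveLine acc.2 line)

def puzzle_2022_5_1 (input : Option String) : String :=
  match input with
  | none => ""      -- input.split(...) on None raises AttributeError; outside Pre_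
  | some s =>
    let lines := PySem.Chars.splitOn s.toList ['\n']
    let n := ((lines.getD 0 []).length + 1) / 4
    let final := lines.foldl (pvA_step n) (false, List.replicate n [])
    -- for st in stacks: ans += st.pop()   (pop on an empty deque raises; outside Pre_)
    String.ofList (final.2.foldl (fun ans st => ans ++ [(PySem.List.pyGet? st (-1)).getD ' ']) [])

-- ===== PORT B =====
-- stack i = [line[1+4*i] for line in reversed(crate_lines) if line[1+4*i] != ' ']
def pvB_col (crates : List (List Char)) (i : Int) : List Char :=
  crates.reverse.filterMap (fun line =>
    if ((PySem.List.pyGet? line (1 + 4 * i)).getD ' ') ≠ ' ' then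
      some ((PySem.List.pyGet? line (1 + 4 * i)).getD ' ')
    else none)

-- one move: bulk transfer — stacks[d].extend(reversed(stacks[s][-cnt:])); del stacks[s][-cnt:]
def pvB_move (st : List (List Char)) (m : List Char) : List (List Char) :=
  let parts := PySem.Chars.splitOn m [' ']
  let cnt := (PySem.Int.ofStr? (String.ofList (parts.getD 1 []))).getD 0
  if 0 < cnt then
    let si := (PySem.Int.ofStr? (String.ofList (parts.getD 3 []))).getD 0 - 1
    let di := (PySem.Int.ofStr? (String.ofList (parts.getD 5 []))).getD 0 - 1
    let moved := PySem.List.slice (PySem.List.pyGetD st si []) (some (-cnt)) none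
    let st1 := PySem.List.pySetD st di (PySem.List.pyGetD st di [] ++ moved.reverse)
    PySem.List.pySetD st1 si (PySem.List.slice (PySem.List.pyGetD st1 si []) none (some (-cnt)))
  else st

def puzzle_2022_5_1_alt (input : Option String) : String :=
  match input with
  | none => ""
  | some s =>
    let lines := PySem.Chars.splitOn s.toList ['\n']
    let n := ((lines.getD 0 []).length + 1) / 4
    let parts :=
      (match PySem.List.index? lines [] with
       | some sep => (PySem.List.slice lines none (some (sep : Int)),
                      PySem.List.slice lines (some ((sep : Int) + 1)) none)
       | none => (lines, ([] : List (List Char))))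
    let stacks0 := (PySem.List.pyRange 0 (n : Int)).map (pvB_col parts.1)
    let stacks1 := parts.2.foldl pvB_move stacks0
    String.ofList (stacks1.map (fun st => (PySem.List.pyGet? st (-1)).getD ' '))

-- ===== PRECONDITION & SPEC =====
-- Pre_ admits exactly the well-formed inputs: every crate line long enough for every column read,
-- every move line parseable with stack numbers addressing an existing stack, no move taking more
-- crates than its source stack holds, and every stack non-empty at the end.  Everything it
-- excludes crashes A (IndexError / ValueError / AttributeError / pop from empty deque) EXCEPT the
-- degenerate self-moves taking more crates than the stack holds: there A returns a value only
-- because its pop/append loop recycles the same crates (a no-op), a corner the puzzle never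
-- specifies, on which B's bulk slice transfer truncates the stack or raises instead.
def pvParse (parts : List (List Char)) (j : Nat) : Option Int :=
  match parts[j]? with
  | none => none
  | some p => PySem.Int.ofStr? (String.ofList p)

def pvSizesStep (n : Nat) (szs? : Option (List Nat)) (m : List Char) : Option (List Nat) :=
  match szs? with
  | none => none
  | some szs =>
    let parts := PySem.Chars.splitOn m [' ']
    match pvParse parts 1 with
    | none => none
    | some k =>
      if k ≤ 0 then some szs else
      match pvParse parts 3, pvParse parts 5 with
      | some a, some b =>
        match PySem.List.pyIdx? n (a - 1), PySem.List.pyIdx? n (b - 1) with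
        | some si, some di =>
          if k.toNat ≤ szs.getD si 0 then
            let szs1 := szs.set di (szs.getD di 0 + k.toNat)
            some (szs1.set si (szs1.getD si 0 - k.toNat))
          else none
        | _, _ => none
      | _, _ => none

def pvPre (input : Option String) : Bool :=
  match input with
  | none => false
  | some s =>
    let lines := PySem.Chars.splitOn s.toList ['\n']
    let n := ((lines.getD 0 []).length + 1) / 4
    let parts :=
      (match List.idxOf? ([] : List Char) lines with
       | some p => (lines.take p, lines.drop (p + 1))
       | none => (lines, ([] : List (List Char))))
    (parts.1.all (fun l => decide (n = 0) || decide (4 * n - 2 ≤ l.length))) &&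
    (let szs0 := (List.range n).map (fun i => (parts.1.filter (fun l => l.getD (1 + 4 * i) ' ' != ' ')).length)
     match parts.2.foldl (pvSizesStep n) (some szs0) with
     | none => false
     | some fin => fin.all (fun x => 1 ≤ x))

def Pre_puzzle_2022_5_1 (input : Option String) : Prop := pvPre input = true
instance (input : Option String) : Decidable (Pre_puzzle_2022_5_1 input) := by
  unfold Pre_puzzle_2022_5_1; infer_instance

def pvWitness_puzzle_2022_5_1 : Option String :=
  some "[A]    \n[B] [C]\n 1   2 \n\nmove 1 from 1 to 2\nmove 2 from 2 to 1"

def Spec_puzzle_2022_5_1 (input : Option String) (out : String) : Prop := out = puzzle_2022_5_1_alt input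
instance (input : Option String) (out : String) : Decidable (Spec_puzzle_2022_5_1 input out) := by
  unfold Spec_puzzle_2022_5_1; infer_instance

-- ===== CLAIM (what is proved, stated in full; the proofs are below) =====
def Claim_equal_puzzle_2022_5_1 : Prop := ∀ (input : Option String), Dom_puzzle_2022_5_1 input → Pre_puzzle_2022_5_1 input → Spec_puzzle_2022_5_1 input (puzzle_2022_5_1 input)

-- ===== LEMMAS AND PROOFS =====

-- ---- generic PySem bridging ----
theorem pv_idx_lt {n : Nat} {i : Int} {k : Nat} (h : PySem.List.pyIdx? n i = some k) : k < n := by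
  simp only [PySem.List.pyIdx?] at h
  split at h <;> split at h <;> simp_all <;> omega

theorem pv_pyGetD_idx {α : Type} (st : List α) (i : Int) (d : α) {k : Nat}
    (h : PySem.List.pyIdx? st.length i = some k) : PySem.List.pyGetD st i d = st.getD k d := by
  simp only [PySem.List.pyGetD, PySem.List.pyGet?, h, Option.bind_some, List.getD_eq_getElem?_getD]

theorem pv_pySetD_idx {α : Type} (st : List α) (i : Int) (v : α) {k : Nat}
    (h : PySem.List.pyIdx? st.length i = some k) : PySem.List.pySetD st i v = st.set k v := by
  simp [PySem.List.pySetD, PySem.List.pySet?, h]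


theorem pv_foldl_const {α β : Type} (g : α → α) :
    ∀ (l : List β) (st : α), l.foldl (fun s _ => g s) st = g^[l.length] st := by
  intro l
  induction l with
  | nil => intro st; rfl
  | cons x xs ih =>
    intro st
    simp [List.foldl_cons, ih, Function.iterate_succ_apply]

theorem pv_filterMap_if {α β : Type} (p : α → Prop) [DecidablePred p] (g : α → β) (l : List α) :
    l.filterMap (fun x => if p x then some (g x) else none)
      = (l.filter (fun x => decide (p x))).map g := by
  induction l with
  | nil => rfl
  | cons x xs ih =>
    by_cases h : p x <;> simp [List.filter_cons, h, ih]

-- ---- splitting A's state machine at the first blank line ----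
theorem pv_A_noFlag (n : Nat) :
    ∀ (lines : List (List Char)) (st : List (List Char)), ([] : List Char) ∉ lines →
      lines.foldl (pvA_step n) (false, st) = (false, lines.foldl (pvA_crateLine n) st) := by
  intro lines
  induction lines with
  | nil => intro st _; rfl
  | cons l ls ih =>
    intro st h
    have hl : l ≠ [] := fun hl => h (hl ▸ List.mem_cons_self)
    have hlen : ¬ l.length = 0 := by simpa [List.length_eq_zero_iff] using hl
    simp only [List.foldl_cons, pvA_step, Bool.not_false, if_neg hlen]
    exact ih _ (fun hm => h (List.mem_cons_of_mem _ hm))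

theorem pv_A_flag (n : Nat) :
    ∀ (lines : List (List Char)) (st : List (List Char)),
      lines.foldl (pvA_step n) (true, st) = (true, lines.foldl pvA_moveLine st) := by
  intro lines
  induction lines with
  | nil => intro st; rfl
  | cons l ls ih => intro st; simp only [List.foldl_cons, pvA_step]; exact ih _

theorem pv_A_split (n : Nat) (pre post : List (List Char)) (st : List (List Char))
    (h : ([] : List Char) ∉ pre) :
    (pre ++ [] :: post).foldl (pvA_step n) (false, st)
      = (true, post.foldl pvA_moveLine (pre.foldl (pvA_crateLine n) st)) := by
  rw [List.foldl_append, pv_A_noFlag n pre st h, List.foldl_cons]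
  have : pvA_step n (false, pre.foldl (pvA_crateLine n) st) [] = (true, pre.foldl (pvA_crateLine n) st) := by
    simp [pvA_step]
  rw [this, pv_A_flag]

theorem pv_idxOf_decomp {l : List (List Char)} {p : Nat} (h : List.idxOf? ([] : List Char) l = some p) :
    l = l.take p ++ [] :: l.drop (p + 1) ∧ ([] : List Char) ∉ l.take p := by
  rw [List.idxOf?_eq_some_iff] at h
  obtain ⟨hp, hv, hprev⟩ := h
  constructor
  · conv_lhs => rw [← List.take_append_drop p l]
    rw [List.drop_eq_getElem_cons hp, hv]
  · intro hmem
    obtain ⟨j, hj, hjv⟩ := List.mem_iff_getElem.mp hmem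
    have hjp : j < p := by simp [List.length_take] at hj; omega
    exact hprev j hjp (by simpa [List.getElem_take] using hjv)

-- ---- crate phase ----
theorem pv_idx_natCast (n k : Nat) (h : k < n) : PySem.List.pyIdx? n (k : Int) = some k := by
  simp [PySem.List.pyIdx?]; omega

-- the per-line inner fold, with guard

theorem pv_crate_fold (line : List Char) :
    ∀ (m : Nat) (st : List (List Char)), m ≤ st.length →
    (PySem.List.pyRange 0 (m : Int)).foldl (fun st i =>
      if ((PySem.List.pyGet? line (1 + 4 * i)).getD ' ') ≠ ' ' then
        PySem.List.pySetD st i (((PySem.List.pyGet? line (1 + 4 * i)).getD ' ') :: PySem.List.pyGetD st i [])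
      else st) st
    = st.mapIdx (fun j t => if j < m then
        (if ((PySem.List.pyGet? line (1 + 4 * (j : Int))).getD ' ') ≠ ' '
         then [((PySem.List.pyGet? line (1 + 4 * (j : Int))).getD ' ')] else []) ++ t else t) := by
  intro m
  induction m with
  | zero =>
    intro st _
    rw [PySem.List.pyRange_one_eq_nil (by norm_num)]
    apply List.ext_getElem?
    intro j
    simp [List.getElem?_mapIdx]
  | succ m ih =>
    intro st hm
    have hcast : ((m + 1 : Nat) : Int) = (m : Int) + 1 := by push_cast; ring
    rw [hcast, PySem.List.pyRange_one_succ_right (by positivity), List.foldl_append]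
    rw [ih st (by omega)]
    set prev := st.mapIdx (fun j t => if j < m then
        (if ((PySem.List.pyGet? line (1 + 4 * (j : Int))).getD ' ') ≠ ' '
         then [((PySem.List.pyGet? line (1 + 4 * (j : Int))).getD ' ')] else []) ++ t else t) with hprev
    have hlen : prev.length = st.length := by simp [hprev]
    have hidx : PySem.List.pyIdx? prev.length (m : Int) = some m := by
      rw [hlen]; exact pv_idx_natCast _ _ (by omega)
    have hget : PySem.List.pyGetD prev (m : Int) ([] : List Char) = st[m]'(by omega) := by
      rw [pv_pyGetD_idx _ _ _ hidx, List.getD_eq_getElem?_getD, hprev, List.getElem?_mapIdx]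
      simp [List.getElem?_eq_getElem (show m < st.length by omega)]
    simp only [List.foldl_cons, List.foldl_nil]
    by_cases hc : ((PySem.List.pyGet? line (1 + 4 * (m : Int))).getD ' ') ≠ ' '
    · rw [if_pos hc, pv_pySetD_idx _ _ _ hidx, hget]
      apply List.ext_getElem?
      intro j
      rw [List.getElem?_set]
      by_cases hjm : m = j
      · subst hjm
        rw [if_pos rfl, if_pos (by omega), List.getElem?_mapIdx,
            List.getElem?_eq_getElem (show m < st.length by omega)]
        simp [hc]
      · rw [if_neg hjm, hprev, List.getElem?_mapIdx, List.getElem?_mapIdx]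
        cases hj : st[j]? with
        | none => rfl
        | some t =>
          simp only [Option.map_some]
          by_cases h1 : j < m
          · simp [h1, Nat.lt_succ_of_lt h1]
          · simp [h1, show ¬ j < m + 1 by omega]
    · rw [if_neg hc]
      apply List.ext_getElem?
      intro j
      rw [hprev, List.getElem?_mapIdx, List.getElem?_mapIdx]
      cases hj : st[j]? with
      | none => rfl
      | some t =>
        simp only [Option.map_some]
        by_cases hjm : j = m
        · subst hjm
          simp only [Nat.lt_irrefl, Nat.lt_succ_self, if_pos]
          simp [hc]
        · by_cases h1 : j < m
          · simp [h1, Nat.lt_succ_of_lt h1]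
          · simp [h1, show ¬ j < m + 1 by omega]

theorem pv_crateLine_eq (n : Nat) (line : List Char) (st : List (List Char)) (h : st.length = n) :
    pvA_crateLine n st line = st.mapIdx (fun j t =>
      (if ((PySem.List.pyGet? line (1 + 4 * (j : Int))).getD ' ') ≠ ' '
       then [((PySem.List.pyGet? line (1 + 4 * (j : Int))).getD ' ')] else []) ++ t) := by
  rw [pvA_crateLine, pv_crate_fold line n st (by omega)]
  apply List.mapIdx_eq_mapIdx_iff.mpr
  intro i hlt
  rw [if_pos (show i < n by omega)]


theorem pv_B_col_cons (l : List Char) (pre : List (List Char)) (i : Int) :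
    pvB_col (l :: pre) i = pvB_col pre i ++
      (if ((PySem.List.pyGet? l (1 + 4 * i)).getD ' ') ≠ ' '
       then [((PySem.List.pyGet? l (1 + 4 * i)).getD ' ')] else []) := by
  simp only [pvB_col, List.reverse_cons, List.filterMap_append]
  congr 1
  by_cases hc : ((PySem.List.pyGet? l (1 + 4 * i)).getD ' ') ≠ ' ' <;>
    simp [List.filterMap, hc]

theorem pv_cratePhase (n : Nat) :
    ∀ (pre : List (List Char)) (st : List (List Char)), st.length = n →
      pre.foldl (pvA_crateLine n) st = st.mapIdx (fun j t => pvB_col pre (j : Int) ++ t) := by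
  intro pre
  induction pre with
  | nil =>
    intro st h
    apply List.ext_getElem?
    intro j
    simp [List.getElem?_mapIdx, pvB_col]
  | cons l ls ih =>
    intro st h
    rw [List.foldl_cons, pv_crateLine_eq n l st h,
        ih _ (by simp [h]), List.mapIdx_mapIdx]
    apply List.mapIdx_eq_mapIdx_iff.mpr
    intro i hlt
    simp only [Function.comp_apply]
    rw [pv_B_col_cons, List.append_assoc]

theorem pv_stacks0 (n : Nat) (crates : List (List Char)) :
    (List.replicate n ([] : List Char)).mapIdx (fun j t => pvB_col crates (j : Int) ++ t)
      = (PySem.List.pyRange 0 (n : Int)).map (pvB_col crates) := by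
  apply List.ext_getElem?
  intro j
  rw [List.getElem?_mapIdx, List.getElem?_map]
  rw [PySem.List.getElem?_pyRange_one]
  by_cases hj : j < n
  · rw [List.getElem?_eq_getElem (by simpa using hj), if_pos (by omega)]
    simp
  · rw [List.getElem?_eq_none (by simpa using hj), if_neg (by omega)]
    rfl

theorem pv_szs0 (n : Nat) (crates : List (List Char)) :
    ((PySem.List.pyRange 0 (n : Int)).map (pvB_col crates)).map List.length
      = (List.range n).map (fun i => (crates.filter (fun l => l.getD (1 + 4 * i) ' ' != ' ')).length) := by
  rw [PySem.List.pyRange_one, List.map_map, List.map_map]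
  simp only [Int.sub_zero, Int.toNat_natCast]
  apply List.map_congr_left
  intro i hi
  simp only [Function.comp_apply, zero_add]
  rw [pvB_col, pv_filterMap_if (fun line => ((PySem.List.pyGet? line (1 + 4 * (i : Int))).getD ' ') ≠ ' ')]
  rw [List.length_map, List.filter_reverse, List.length_reverse]
  congr 1
  apply List.filter_congr
  intro l _
  have hc : (1 : Int) + 4 * (i : Int) = ((1 + 4 * i : Nat) : Int) := by push_cast; ring
  rw [hc, PySem.List.pyGet?_natCast, ← List.getD_eq_getElem?_getD]
  simp only [decide_not, bne]
  rfl

def pvPopN (si di : Nat) (st : List (List Char)) : List (List Char) :=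
  let v := ((st.getD si []).getLast?).getD ' '
  let st' := st.set si (st.getD si []).dropLast
  st'.set di (st'.getD di [] ++ [v])

theorem pv_popN_self (si : Nat) (st : List (List Char)) (hsi : si < st.length)
    (hne : st.getD si [] ≠ []) : pvPopN si si st = st := by
  unfold pvPopN
  simp only [List.set_set]
  rw [List.getD_eq_getElem?_getD, List.getElem?_set, if_pos rfl, if_pos hsi]
  simp only [Option.getD_some]
  rw [List.getD_eq_getElem?_getD, List.getElem?_eq_getElem hsi] at hne ⊢
  simp only [Option.getD_some] at hne ⊢
  rw [List.getLast?_eq_some_getLast hne]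
  simp only [Option.getD_some]
  rw [List.dropLast_append_getLast hne]
  exact List.set_getElem_self hsi

theorem pv_popN_self_iter' (si : Nat) (st : List (List Char)) (hsi : si < st.length)
    (hne : st.getD si [] ≠ []) : ∀ k : Nat, (pvPopN si si)^[k] st = st := by
  intro k
  induction k with
  | zero => rfl
  | succ k ih => rw [Function.iterate_succ_apply', ih, pv_popN_self si st hsi hne]

theorem pv_popN_ne_iter (si di : Nat) (hne : si ≠ di) :
    ∀ (k : Nat) (st : List (List Char)), si < st.length → di < st.length →
      k ≤ (st.getD si []).length →
      (pvPopN si di)^[k] st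
        = (st.set di (st.getD di [] ++ ((st.getD si []).drop ((st.getD si []).length - k)).reverse)).set si
            ((st.getD si []).take ((st.getD si []).length - k)) := by
  intro k
  induction k with
  | zero =>
    intro st hsi hdi hk
    simp only [Function.iterate_zero_apply, Nat.sub_zero, List.drop_length, List.reverse_nil,
      List.append_nil, List.take_length]
    rw [List.getD_eq_getElem?_getD, List.getElem?_eq_getElem hdi, Option.getD_some,
        List.getD_eq_getElem?_getD, List.getElem?_eq_getElem hsi, Option.getD_some,
        List.set_getElem_self hdi, List.set_getElem_self hsi]
  | succ k ih =>
    intro st hsi hdi hk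
    set L := st.getD si [] with hL
    have hm : k + 1 ≤ L.length := hk
    rw [Function.iterate_succ_apply', ih st hsi hdi (by rw [← hL]; omega)]
    set X := st.getD di [] ++ (L.drop (L.length - k)).reverse with hX
    have hpsi : ((st.set di X).set si (L.take (L.length - k))).getD si [] = L.take (L.length - k) := by
      rw [List.getD_eq_getElem?_getD, List.getElem?_set, if_pos rfl, if_pos (by simpa using hsi),
          Option.getD_some]
    have htlen : (L.take (L.length - k)).length = L.length - k := by
      rw [List.length_take]; omega
    have htne : L.take (L.length - k) ≠ [] := by
      intro hnil; rw [hnil] at htlen; simp at htlen; omega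
    have hlast : (L.take (L.length - k)).getLast? = some (L[L.length - (k + 1)]'(by omega)) := by
      rw [List.getLast?_eq_getElem?, htlen, List.getElem?_take_of_lt (by omega),
          List.getElem?_eq_getElem (by omega)]
      simp only [show L.length - k - 1 = L.length - (k + 1) from by omega]
    unfold pvPopN
    rw [hpsi, hlast]
    simp only [Option.getD_some, List.set_set]
    rw [List.set_comm _ _ hne, List.set_set]
    have hdl : (L.take (L.length - k)).dropLast = L.take (L.length - (k + 1)) := by
      rw [List.dropLast_eq_take, List.take_take, htlen]
      congr 1
      omega
    have hgd : ((st.set di X).set si ((L.take (L.length - k)).dropLast)).getD di [] = X := by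
      rw [List.getD_eq_getElem?_getD, List.getElem?_set, if_neg hne, List.getElem?_set,
          if_pos rfl, if_pos hdi, Option.getD_some]
    rw [hgd, hdl, hX]
    have hdrop : L.drop (L.length - (k + 1)) = L[L.length - (k + 1)]'(by omega) :: L.drop (L.length - k) := by
      rw [List.drop_eq_getElem_cons (by omega)]
      congr 2
      omega
    rw [hdrop]
    simp [List.append_assoc]

theorem pv_parse_getD (parts : List (List Char)) (j : Nat) (v : Int)
    (h : pvParse parts j = some v) :
    (PySem.Int.ofStr? (String.ofList (parts.getD j []))).getD 0 = v := by
  unfold pvParse at h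
  cases hj : parts[j]? with
  | none => rw [hj] at h; cases h
  | some p => rw [hj] at h; simp only at h; rw [List.getD_eq_getElem?_getD, hj, Option.getD_some, h]; rfl

theorem pv_iter_eq (f g : List (List Char) → List (List Char)) (n : Nat)
    (hfg : ∀ s, s.length = n → f s = g s) (hg : ∀ s, (g s).length = s.length) :
    ∀ (k : Nat) (s : List (List Char)), s.length = n → f^[k] s = g^[k] s := by
  intro k
  induction k with
  | zero => intro s _; rfl
  | succ k ih =>
    intro s hs
    rw [Function.iterate_succ_apply, Function.iterate_succ_apply, hfg s hs,
        ih (g s) (by rw [hg s, hs])]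

theorem pv_popN_length (si di : Nat) (s : List (List Char)) : (pvPopN si di s).length = s.length := by
  simp [pvPopN]

theorem pv_getD_map_length (st : List (List Char)) (j : Nat) (hj : j < st.length) :
    (st.map List.length).getD j 0 = (st.getD j []).length := by
  rw [List.getD_eq_getElem?_getD, List.getElem?_map, List.getElem?_eq_getElem hj,
      List.getD_eq_getElem?_getD, List.getElem?_eq_getElem hj]
  rfl

set_option maxHeartbeats 1000000 in

set_option maxHeartbeats 1000000 in
theorem pv_moveEq (n : Nat) (st : List (List Char)) (m : List Char) (szs' : List Nat)
    (hn : st.length = n)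
    (h : pvSizesStep n (some (st.map List.length)) m = some szs') :
    pvA_moveLine st m = pvB_move st m ∧ (pvB_move st m).map List.length = szs' := by
  unfold pvSizesStep at h
  simp only at h
  cases hp1 : pvParse (PySem.Chars.splitOn m [' ']) 1 with
  | none => rw [hp1] at h; cases h
  | some k =>
  rw [hp1] at h
  simp only at h
  have hcnt := pv_parse_getD _ 1 k hp1
  by_cases hk : k ≤ 0
  · rw [if_pos hk, Option.some_inj] at h
    constructor
    · unfold pvA_moveLine pvB_move
      simp only [hcnt]
      rw [PySem.List.pyRange_one_eq_nil hk, List.foldl_nil, if_neg (by omega)]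
    · unfold pvB_move
      simp only [hcnt]
      rw [if_neg (by omega), h]
  · rw [if_neg hk] at h
    cases hp3 : pvParse (PySem.Chars.splitOn m [' ']) 3 with
    | none => rw [hp3] at h; cases h
    | some a =>
    cases hp5 : pvParse (PySem.Chars.splitOn m [' ']) 5 with
    | none => rw [hp3, hp5] at h; cases h
    | some b =>
    rw [hp3, hp5] at h
    simp only at h
    cases hia : PySem.List.pyIdx? n (a - 1) with
    | none => rw [hia] at h; cases h
    | some si =>
    cases hib : PySem.List.pyIdx? n (b - 1) with
    | none => rw [hia, hib] at h; cases h
    | some di =>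
    rw [hia, hib] at h
    simp only at h
    by_cases hsz : k.toNat ≤ (st.map List.length).getD si 0
    swap
    · rw [if_neg hsz] at h; cases h
    rw [if_pos hsz, Option.some_inj] at h
    have ha := pv_parse_getD _ 3 a hp3
    have hb := pv_parse_getD _ 5 b hp5
    have hsi : si < n := pv_idx_lt hia
    have hdi : di < n := pv_idx_lt hib
    set L := st.getD si [] with hL
    have hszL : k.toNat ≤ L.length := by
      rwa [pv_getD_map_length st si (by omega)] at hsz
    have hk1 : 1 ≤ k.toNat := by omega
    -- the A-side loop body equals pvPopN on length-n states
    have hbody : ∀ s : List (List Char), s.length = n →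
        (PySem.List.pySetD (PySem.List.pySetD s (a - 1) (PySem.List.pyGetD s (a - 1) []).dropLast)
          (b - 1) (PySem.List.pyGetD (PySem.List.pySetD s (a - 1) (PySem.List.pyGetD s (a - 1) []).dropLast)
            (b - 1) [] ++ [(PySem.List.pyGet? (PySem.List.pyGetD s (a - 1) []) (-1)).getD ' '])) = pvPopN si di s := by
      intro s hs
      have hia' : PySem.List.pyIdx? s.length (a - 1) = some si := by rw [hs]; exact hia
      have hib' : PySem.List.pyIdx? s.length (b - 1) = some di := by rw [hs]; exact hib
      have hib'' : PySem.List.pyIdx?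
          (PySem.List.pySetD s (a - 1) (PySem.List.pyGetD s (a - 1) []).dropLast).length (b - 1) = some di := by
        rw [PySem.List.length_pySetD]; exact hib'
      rw [pv_pyGetD_idx s (a - 1) _ hia', pv_pySetD_idx s (a - 1) _ hia',
          pv_pyGetD_idx _ (b - 1) _ (by rw [List.length_set]; exact hib'),
          pv_pySetD_idx _ (b - 1) _ (by rw [List.length_set]; exact hib')]
      unfold pvPopN
      rw [PySem.List.pyGet?_neg_one]
    -- the A side is the iterated single pop
    have hA : pvA_moveLine st m = (pvPopN si di)^[k.toNat] st := by
      unfold pvA_moveLine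
      simp only [hcnt, ha, hb]
      rw [pv_foldl_const, PySem.List.length_pyRange_one]
      simp only [Int.sub_zero]
      exact pv_iter_eq _ _ n hbody (pv_popN_length si di) k.toNat st hn
    -- the B side, unfolded
    have hkc : -k = -((k.toNat : Nat) : Int) := by omega
    have hB : pvB_move st m =
        (st.set di (st.getD di [] ++ (L.drop (L.length - k.toNat)).reverse)).set si
          (((st.set di (st.getD di [] ++ (L.drop (L.length - k.toNat)).reverse)).getD si []).take
            (((st.set di (st.getD di [] ++ (L.drop (L.length - k.toNat)).reverse)).getD si []).length - k.toNat)) := by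
      unfold pvB_move
      simp only [hcnt, ha, hb]
      rw [if_pos (by omega)]
      rw [pv_pyGetD_idx st (a - 1) _ (by rw [hn]; exact hia),
          pv_pySetD_idx st (b - 1) _ (by rw [hn]; exact hib),
          pv_pyGetD_idx st (b - 1) _ (by rw [hn]; exact hib)]
      rw [hkc, PySem.List.slice_from_neg_natCast _ _ (by omega)]
      rw [pv_pyGetD_idx _ (a - 1) _ (by rw [List.length_set, hn]; exact hia),
          pv_pySetD_idx _ (a - 1) _ (by rw [List.length_set, hn]; exact hia)]
      rw [PySem.List.slice_to_neg_natCast _ _ (by omega)]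
    set X := st.getD di [] ++ (L.drop (L.length - k.toNat)).reverse with hX
    by_cases hsd : si = di
    · -- source and destination are the same stack: both sides leave it unchanged
      subst hsd
      have hneL : L ≠ [] := by
        intro h0
        rw [h0] at hszL
        simp at hszL
        omega
      have hRlen : (L.drop (L.length - k.toNat)).length = k.toNat := by
        rw [List.length_drop]
        omega
      have hgd : (st.set si X).getD si [] = X := by
        rw [List.getD_eq_getElem?_getD, List.getElem?_set, if_pos rfl, if_pos (by omega),
            Option.getD_some]
      have htake : X.take (X.length - k.toNat) = L := by
        rw [hX, ← hL, List.length_append, List.length_reverse, hRlen, Nat.add_sub_cancel]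
        exact List.take_left
      have hBid : pvB_move st m = st := by
        rw [hB, List.set_set, hgd, htake]
        have hLe : st[si]'(by omega) = L := by
          rw [hL, List.getD_eq_getElem?_getD,
              List.getElem?_eq_getElem (by omega : si < st.length), Option.getD_some]
        rw [← hLe]
        exact List.set_getElem_self (by omega)
      constructor
      · rw [hA, hBid, pv_popN_self_iter' si st (by omega) (by rw [← hL]; exact hneL)]
      · rw [hBid, ← h, List.set_set]
        have hlen : si < (st.map List.length).length := by
          rw [List.length_map]; omega
        have hgm : ((st.map List.length).set si ((st.map List.length).getD si 0 + k.toNat)).getD si 0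
            = (st.map List.length).getD si 0 + k.toNat := by
          rw [List.getD_eq_getElem?_getD, List.getElem?_set, if_pos rfl, if_pos hlen,
              Option.getD_some]
        rw [hgm, Nat.add_sub_cancel, List.getD_eq_getElem?_getD, List.getElem?_eq_getElem hlen,
            Option.getD_some]
        exact (List.set_getElem_self hlen).symm
    · -- distinct stacks: the k-fold pop/append equals the bulk slice transfer
      have hgd : (st.set di X).getD si [] = L := by
        rw [List.getD_eq_getElem?_getD, List.getElem?_set, if_neg (fun hh => hsd hh.symm),
            ← List.getD_eq_getElem?_getD, ← hL]
      have hclosed : pvB_move st m = (st.set di X).set si (L.take (L.length - k.toNat)) := by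
        rw [hB, hgd]
      constructor
      · rw [hA, hclosed, hX, pv_popN_ne_iter si di hsd k.toNat st (by omega) (by omega) hszL]
      · rw [hclosed, ← h]
        have hRlen : (L.drop (L.length - k.toNat)).length = k.toNat := by
          rw [List.length_drop]
          omega
        rw [List.map_set, List.map_set]
        congr 1
        · congr 1
          rw [hX, List.length_append, List.length_reverse, hRlen,
              pv_getD_map_length st di (by omega)]
        · rw [List.length_take]
          have hgm : ((st.map List.length).set di ((st.map List.length).getD di 0 + k.toNat)).getD si 0
              = (st.map List.length).getD si 0 := by
            rw [List.getD_eq_getElem?_getD, List.getElem?_set, if_neg (fun hh => hsd hh.symm),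
                ← List.getD_eq_getElem?_getD]
          rw [hgm, pv_getD_map_length st si (by omega), ← hL]
          omega

theorem pv_sizes_none (n : Nat) (moves : List (List Char)) :
    moves.foldl (pvSizesStep n) none = none := by
  induction moves with
  | nil => rfl
  | cons m ms ih => simpa [pvSizesStep] using ih

theorem pv_B_move_length (st : List (List Char)) (m : List Char) :
    (pvB_move st m).length = st.length := by
  unfold pvB_move
  simp only
  split
  · rw [PySem.List.length_pySetD, PySem.List.length_pySetD]
  · rfl

theorem pv_movePhase (n : Nat) :
    ∀ (moves : List (List Char)) (st : List (List Char)) (fin : List Nat), st.length = n →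
      moves.foldl (pvSizesStep n) (some (st.map List.length)) = some fin →
      moves.foldl pvA_moveLine st = moves.foldl pvB_move st := by
  intro moves
  induction moves with
  | nil => intro st fin _ _; rfl
  | cons m ms ih =>
    intro st fin hn hfold
    simp only [List.foldl_cons] at hfold ⊢
    cases hstep : pvSizesStep n (some (st.map List.length)) m with
    | none =>
      rw [hstep, pv_sizes_none n ms] at hfold
      cases hfold
    | some szs' =>
      rw [hstep] at hfold
      obtain ⟨hAB, hlen⟩ := pv_moveEq n st m szs' hn hstep
      rw [hAB]
      exact ih (pvB_move st m) fin (by rw [pv_B_move_length, hn]) (by rw [hlen]; exact hfold)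


-- ===== VERDICT (by name: the statement is the Claim_ definition above) =====
theorem puzzle_2022_5_1_spec : Claim_equal_puzzle_2022_5_1 := by
  unfold Claim_equal_puzzle_2022_5_1
  intro input _ hpre
  unfold Spec_puzzle_2022_5_1
  cases input with
  | none => simp [Pre_puzzle_2022_5_1, pvPre] at hpre
  | some s =>
    unfold Pre_puzzle_2022_5_1 pvPre at hpre
    simp only at hpre
    unfold puzzle_2022_5_1 puzzle_2022_5_1_alt
    simp only
    set lines := PySem.Chars.splitOn s.toList ['\n'] with hlines
    set n := ((lines.getD 0 []).length + 1) / 4 with hn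
    have hidx : PySem.List.index? lines ([] : List Char) = List.idxOf? ([] : List Char) lines := rfl
    cases hio : List.idxOf? ([] : List Char) lines with
    | none =>
      rw [hio] at hpre
      simp only at hpre
      have hnotin : ([] : List Char) ∉ lines := List.idxOf?_eq_none_iff.mp hio
      rw [hidx, hio]
      simp only
      rw [pv_A_noFlag n lines _ hnotin]
      rw [pv_cratePhase n lines (List.replicate n []) (by simp), pv_stacks0 n lines]
      rw [PySem.List.foldl_append_singleton_eq_map, List.nil_append, List.foldl_nil]
    | some p =>
      rw [hio] at hpre
      simp only at hpre
      obtain ⟨hconc, hnotin⟩ := pv_idxOf_decomp hio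
      rw [Bool.and_eq_true] at hpre
      obtain ⟨_, hpre2⟩ := hpre
      rw [hidx, hio]
      simp only
      -- the A-side single fold splits at the blank line
      have hAfold : lines.foldl (pvA_step n) (false, List.replicate n []) =
          (true, (lines.drop (p + 1)).foldl pvA_moveLine
            ((lines.take p).foldl (pvA_crateLine n) (List.replicate n []))) := by
        conv_lhs => rw [hconc]
        exact pv_A_split n (lines.take p) (lines.drop (p + 1)) _ hnotin
      rw [hAfold]
      simp only
      -- B's slices are take / drop
      have hsl1 : PySem.List.slice lines none (some ((p : Nat) : Int)) = lines.take p :=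
        PySem.List.slice_to_natCast lines p
      have hsl2 : PySem.List.slice lines (some (((p : Nat) : Int) + 1)) none = lines.drop (p + 1) := by
        have : ((p : Nat) : Int) + 1 = (((p + 1 : Nat)) : Int) := by push_cast; ring
        rw [this, PySem.List.slice_from_natCast lines (p + 1)]
      rw [hsl1, hsl2]
      -- crate phase
      rw [pv_cratePhase n (lines.take p) (List.replicate n []) (by simp),
          pv_stacks0 n (lines.take p)]
      -- move phase
      cases hfold : (lines.drop (p + 1)).foldl (pvSizesStep n)
          (some ((List.range n).map (fun i => ((lines.take p).filter
            (fun l => l.getD (1 + 4 * i) ' ' != ' ')).length))) with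
      | none => rw [hfold] at hpre2; cases hpre2
      | some fin =>
        have hlen0 : ((PySem.List.pyRange 0 (n : Int)).map (pvB_col (lines.take p))).length = n := by
          rw [List.length_map, PySem.List.length_pyRange_one]
          omega
        have hAB := pv_movePhase n (lines.drop (p + 1))
          ((PySem.List.pyRange 0 (n : Int)).map (pvB_col (lines.take p))) fin hlen0
          (by rw [pv_szs0]; exact hfold)
        rw [hAB, PySem.List.foldl_append_singleton_eq_map, List.nil_append]
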